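-- pv_equiv track=rewrite | github.com/vandreas19/spelling_correction_using_ngram | SpellingCorrection/implementasi/spell_correct.py | gen_bigrams_indexing
-- ===== SOURCE A (Python) =====
-- def gen_bigrams_indexing(source):
--     uniq_gram = []
--     for i in range(len(source)):
--         for j in range(len(source[i])-1):
--             kata = source[i][j:j+2]
--             if kata not in uniq_gram:
--                 uniq_gram.append(kata)
--     mydi = {}
--     for i in uniq_gram:
--         lis = []
--         for j in source:
--             if i in j:
--                lis.append(j)
--         mydi[i] = lis
--     return mydi
-- ===== SOURCE B (Python) =====
-- def gen_bigrams_indexing(source):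
--     # Single pass: each word is appended to the bucket of each of its
--     # distinct bigrams; buckets are created (in insertion order) on first sight.
--     index = {}
--     for word in source:
--         seen = set()
--         for j in range(len(word) - 1):
--             bg = word[j:j + 2]
--             if bg not in seen:
--                 seen.add(bg)
--                 index.setdefault(bg, []).append(word)
--     return index
-- ===== Notes on version B (the rewrite author's own statement) =====
-- stated objective: faster
-- what changed: Instead of first deduplicating all bigrams with a quadratic 'not in list' scan and then re-scanning every word with a substring test per bigram, B makes a single pass over the words, appending each word to the bucket of each of its distinct bigrams in an insertion-ordered dict.
import Mathlib
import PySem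

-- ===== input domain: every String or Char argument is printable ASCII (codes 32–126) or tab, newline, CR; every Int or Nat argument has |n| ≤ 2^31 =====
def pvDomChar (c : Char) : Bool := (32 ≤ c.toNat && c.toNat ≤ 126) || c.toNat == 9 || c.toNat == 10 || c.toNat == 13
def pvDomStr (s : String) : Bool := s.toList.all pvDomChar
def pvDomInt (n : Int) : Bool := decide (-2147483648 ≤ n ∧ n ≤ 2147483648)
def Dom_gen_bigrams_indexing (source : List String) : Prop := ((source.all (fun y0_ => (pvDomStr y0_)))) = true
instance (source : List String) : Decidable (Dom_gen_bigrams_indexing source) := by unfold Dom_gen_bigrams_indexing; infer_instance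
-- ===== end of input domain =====

-- B replaces A's two-phase scheme (quadratic dedup of all bigrams, then one whole-source
-- substring scan per bigram) by a single pass adding each word to its distinct bigrams' buckets.

-- ===== PORT A =====
-- first loop of A: collect the distinct bigrams, in first-occurrence order
def pvA_uniq (source : List String) : List String :=
  source.foldl
    (fun acc w =>
      (PySem.List.pyRange 0 (PySem.Str.len w - 1)).foldl
        (fun acc2 j =>
          let kata := PySem.Str.slice w (some j) (some (j + 2))
          if acc2.contains kata then acc2 else acc2 ++ [kata])
        acc)
    []

def gen_bigrams_indexing (source : List String) : List (String × List String) :=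
  let uniq_gram := pvA_uniq source
  let mydi : PySem.Dict String (List String) :=
    uniq_gram.foldl
      (fun d i =>
        d.insert i (source.foldl (fun lis j => if PySem.Str.isIn i j then lis ++ [j] else lis) []))
      PySem.Dict.empty
  mydi.items

-- ===== PORT B =====
-- body of B's single loop: append `word` to the bucket of each of its distinct bigrams
def pvB_word (word : String) (index : PySem.Dict String (List String)) :
    PySem.Dict String (List String) :=
  ((PySem.List.pyRange 0 (PySem.Str.len word - 1)).foldl
    (fun (st : PySem.Set String × PySem.Dict String (List String)) j =>
      let bg := PySem.Str.slice word (some j) (some (j + 2))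
      if st.1.contains bg then st
      else (st.1.add bg, st.2.modify bg [] (fun l => l ++ [word])))
    (PySem.Set.empty, index)).2

def gen_bigrams_indexing_alt (source : List String) : List (String × List String) :=
  (source.foldl (fun index word => pvB_word word index) PySem.Dict.empty).items

-- ===== PRECONDITION & SPEC =====
def Spec_gen_bigrams_indexing (source : List String) (out : List (String × List String)) : Prop := out = gen_bigrams_indexing_alt source
instance (source : List String) (out : List (String × List String)) : Decidable (Spec_gen_bigrams_indexing source out) := by unfold Spec_gen_bigrams_indexing; infer_instance

-- ===== CLAIM (what is proved, stated in full; the proofs are below) =====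
def Claim_equal_gen_bigrams_indexing : Prop := ∀ (source : List String), Dom_gen_bigrams_indexing source → Spec_gen_bigrams_indexing source (gen_bigrams_indexing source)

-- ===== LEMMAS AND PROOFS =====

-- the bigrams of one word, in scan order (possibly with duplicates)
def gramsL (w : String) : List String :=
  (PySem.List.pyRange 0 (PySem.Str.len w - 1)).map
    (fun j => PySem.Str.slice w (some j) (some (j + 2)))

-- the distinct bigrams of one word, in first-occurrence order
def dgramsL (w : String) : List String := PySem.Set.ofList (gramsL w)

-- A's inner dedup loop is Set.update by the word's bigram list
theorem pvA_inner_eq (w : String) (acc : PySem.Set String) :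
    (PySem.List.pyRange 0 (PySem.Str.len w - 1)).foldl
      (fun acc2 j =>
        let kata := PySem.Str.slice w (some j) (some (j + 2))
        if acc2.contains kata then acc2 else acc2 ++ [kata])
      acc = PySem.Set.update acc (gramsL w) := by
  rw [gramsL, PySem.Set.update_map_eq_foldl_add]
  congr 1

theorem foldl_update_eq (l : List String) :
    ∀ (s : PySem.Set String),
      l.foldl (fun acc w => PySem.Set.update acc (gramsL w)) s
        = PySem.Set.update s (l.flatMap gramsL) := by
  induction l with
  | nil => intro s; simp [PySem.Set.update]
  | cons w l ih =>
      intro s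
      simp only [List.foldl_cons, List.flatMap_cons, PySem.Set.update_append, ih]

theorem ofList_self (l : List String) (h : l.Nodup) : PySem.Set.ofList l = l := by
  have h2 := PySem.Set.update_eq_append_of_disjoint (PySem.Set.empty) l h
    (by intro x hx; simp [PySem.Set.empty])
  rw [PySem.Set.update_empty] at h2
  simpa [PySem.Set.empty] using h2

theorem update_ofList (s : PySem.Set String) (xs : List String) :
    PySem.Set.update s (PySem.Set.ofList xs) = PySem.Set.update s xs := by
  rw [PySem.Set.update_eq_append_filter, PySem.Set.update_eq_append_filter,
    ofList_self (PySem.Set.ofList xs) (PySem.Set.nodup_ofList xs)]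

theorem update_flatMap_dgrams (l : List String) :
    ∀ (s : PySem.Set String),
      PySem.Set.update s (l.flatMap dgramsL) = PySem.Set.update s (l.flatMap gramsL) := by
  induction l with
  | nil => intro s; rfl
  | cons w l ih =>
      intro s
      simp only [List.flatMap_cons, PySem.Set.update_append, dgramsL, update_ofList, ih]

theorem uniq_char (source : List String) :
    pvA_uniq source = PySem.Set.ofList (source.flatMap gramsL) := by
  unfold pvA_uniq
  have h : (fun (acc : List String) (w : String) =>
      (PySem.List.pyRange 0 (PySem.Str.len w - 1)).foldl
        (fun acc2 j =>
          let kata := PySem.Str.slice w (some j) (some (j + 2))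
          if acc2.contains kata then acc2 else acc2 ++ [kata])
        acc)
      = fun acc w => PySem.Set.update acc (gramsL w) := by
    funext acc w; exact pvA_inner_eq w acc
  rw [h, foldl_update_eq, ← PySem.Set.update_empty]
  rfl

-- B's seen-set filtering loop performs `step` once per distinct unseen element, in order
theorem seen_fold (step : PySem.Dict String (List String) → String → PySem.Dict String (List String))
    (gs : List String) :
    ∀ (S : PySem.Set String) (d : PySem.Dict String (List String)),
      (gs.foldl
        (fun st g => if st.1.contains g then st else (st.1.add g, step st.2 g))
        (S, d)).2
      = (List.filter (fun g => !S.contains g) (PySem.Set.ofList gs)).foldl step d := by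
  induction gs with
  | nil => intro S d; rfl
  | cons g gs ih =>
      intro S d
      have hofl : PySem.Set.ofList (g :: gs)
          = g :: List.filter (fun y => !([g] : List String).contains y) (PySem.Set.ofList gs) := by
        have h2 := PySem.Set.ofList_append [g] gs
        rw [PySem.Set.update_eq_append_filter] at h2
        simpa [ofList_self [g] (by simp)] using h2
      by_cases hc : S.contains g = true
      · rw [List.foldl_cons, if_pos (show ((S, d).1.contains g = true) from hc), ih, hofl,
          List.filter_cons, if_neg (show ¬((!S.contains g) = true) by rw [hc]; simp),
          List.filter_filter]
        congr 1
        apply List.filter_congr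
        intro y _
        by_cases hyg : y = g
        · rw [hyg, hc]; simp
        · have h1 : (([g] : List String).contains y) = false := by
            simp [hyg]
          rw [h1]; simp
      · have hc' : S.contains g = false := by simpa using hc
        rw [List.foldl_cons, if_neg (show ¬((S, d).1.contains g = true) from by rw [hc']; simp),
          ih, hofl, List.filter_cons,
          if_pos (show ((!S.contains g) = true) from by rw [hc']; simp),
          List.foldl_cons, List.filter_filter]
        congr 1
        apply List.filter_congr
        intro y _
        have hgS : g ∉ S := fun h => hc (List.contains_iff_mem.mpr h)
        have hadd : PySem.Set.add S g = S ++ [g] := by simp [PySem.Set.add, hgS]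
        by_cases hyg : y = g
        · rw [hyg]; simp [hadd, List.mem_append]
        · by_cases hyS : y ∈ S
          · simp [hadd, List.mem_append, hyS, hyg]
          · simp [hadd, List.mem_append, hyS, hyg]

theorem pvB_word_eq (w : String) (d : PySem.Dict String (List String)) :
    pvB_word w d
      = (dgramsL w).foldl (fun d g => d.modify g [] (fun l => l ++ [w])) d := by
  unfold pvB_word
  have h : (PySem.List.pyRange 0 (PySem.Str.len w - 1)).foldl
      (fun (st : PySem.Set String × PySem.Dict String (List String)) j =>
        let bg := PySem.Str.slice w (some j) (some (j + 2))
        if st.1.contains bg then st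
        else (st.1.add bg, st.2.modify bg [] (fun l => l ++ [w])))
      (PySem.Set.empty, d)
      = (gramsL w).foldl
        (fun (st : PySem.Set String × PySem.Dict String (List String)) g =>
          if st.1.contains g then st
          else (st.1.add g, st.2.modify g [] (fun l => l ++ [w])))
        (PySem.Set.empty, d) := by
    rw [gramsL, List.foldl_map]
  rw [h, seen_fold (fun d g => d.modify g [] (fun l => l ++ [w])) (gramsL w)]
  have hfil : (fun g => !(PySem.Set.empty : PySem.Set String).contains g) = fun _ => true := by
    funext g; simp [PySem.Set.empty]
  rw [hfil, List.filter_true, dgramsL]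

-- filtering a duplicate-free list for one value
theorem nodup_filter_beq (g : String) (l : List String) (h : l.Nodup) :
    l.filter (fun x => x == g) = if g ∈ l then [g] else [] := by
  induction l with
  | nil => simp
  | cons a l ih =>
      have hn := (List.nodup_cons.mp h)
      by_cases hag : a = g
      · subst hag
        simp [ih hn.2, hn.1]
      · have : (a == g) = false := by simpa using hag
        simp [this, ih hn.2, Ne.symm hag]

theorem valB_eq (g : String) (src : List String) :
    List.map (fun p => p.2)
      (List.filter (fun p => p.1 == g)
        (src.flatMap (fun w => (dgramsL w).map (fun g' => (g', w)))))
    = src.filter (fun w => (dgramsL w).contains g) := by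
  induction src with
  | nil => rfl
  | cons w src ih =>
      simp only [List.flatMap_cons, List.filter_append, List.map_append, ih]
      have hfm : List.filter (fun p => p.1 == g) ((dgramsL w).map (fun g' => (g', w)))
          = ((dgramsL w).filter (fun g' => g' == g)).map (fun g' => (g', w)) := by
        rw [List.filter_map]
        rfl
      rw [hfm, nodup_filter_beq g (dgramsL w) (PySem.Set.nodup_ofList (gramsL w))]
      by_cases hg : g ∈ dgramsL w
      · simp [hg]
      · simp [hg]

-- membership in a word's bigram list, characterised by drop/take
theorem grams_char (g w : String) :
    g ∈ gramsL w
      ↔ ∃ j : ℕ, j + 2 ≤ w.toList.length ∧ g.toList = (w.toList.drop j).take 2 := by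
  simp only [gramsL, List.mem_map, PySem.List.mem_pyRange_one]
  constructor
  · rintro ⟨j, ⟨hj0, hjlt⟩, hslice⟩
    refine ⟨j.toNat, ?_, ?_⟩
    · rw [PySem.Str.len_eq] at hjlt; omega
    · rw [← hslice, PySem.Str.toList_slice, PySem.Chars.slice_eq_listSlice]
      have hj : j = ((j.toNat : ℕ) : ℤ) := by omega
      rw [hj]
      have h2 : ((j.toNat : ℕ) : ℤ) + 2 = ((j.toNat : ℕ) : ℤ) + ((2 : ℕ) : ℤ) := by norm_num
      rw [h2, PySem.List.slice_natCast_add, Int.toNat_natCast]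
  · rintro ⟨j, hj, hg⟩
    refine ⟨(j : ℤ), ⟨by positivity, ?_⟩, ?_⟩
    · rw [PySem.Str.len_eq]; omega
    · rw [← String.toList_inj]
      rw [PySem.Str.toList_slice, PySem.Chars.slice_eq_listSlice]
      have h2 : ((j : ℕ) : ℤ) + 2 = ((j : ℕ) : ℤ) + ((2 : ℕ) : ℤ) := by norm_num
      rw [h2, PySem.List.slice_natCast_add, ← hg]

theorem grams_len {g w : String} (h : g ∈ gramsL w) : g.toList.length = 2 := by
  obtain ⟨j, hj, hg⟩ := (grams_char g w).mp h
  rw [hg]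
  simp only [List.length_take, List.length_drop]
  omega

-- for a length-2 string, Python's substring test is membership in the bigram set
theorem isIn_bridge (g : String) (hlen : g.toList.length = 2) (w : String) :
    PySem.Str.isIn g w = (dgramsL w).contains g := by
  rw [Bool.eq_iff_iff]
  rw [List.contains_iff_mem]
  rw [PySem.Str.isIn_eq]
  rw [← PySem.Chars.exists_prefix_drop_iff_isIn]
  rw [dgramsL, PySem.Set.mem_ofList, grams_char]
  constructor
  · rintro ⟨j, hpre⟩
    have htake := List.prefix_iff_eq_take.mp hpre
    rw [hlen] at htake
    refine ⟨j, ?_, htake⟩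
    have hl : g.toList.length ≤ (w.toList.drop j).length := hpre.length_le
    simp only [List.length_drop] at hl
    omega
  · rintro ⟨j, hj, hg⟩
    exact ⟨j, by rw [hg]; exact List.take_prefix 2 _⟩

-- ===== VERDICT (by name: the statement is the Claim_ definition above) =====
theorem gen_bigrams_indexing_spec : Claim_equal_gen_bigrams_indexing := by
  intro source _
  unfold Spec_gen_bigrams_indexing
  -- names
  set uniq := PySem.Set.ofList (source.flatMap gramsL) with huniq
  -- A's side
  have hA : gen_bigrams_indexing source
      = uniq.map (fun g => (g, source.filter (fun w => PySem.Str.isIn g w))) := by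
    unfold gen_bigrams_indexing
    rw [uniq_char]
    rw [PySem.Dict.items_foldl_insert_fresh (PySem.Set.ofList (source.flatMap gramsL))
      (fun i => i)
      (fun i => source.foldl (fun lis j => if PySem.Str.isIn i j then lis ++ [j] else lis) [])
      PySem.Dict.empty
      (by intro a _; exact PySem.Dict.contains_empty a)
      (by simp)]
    have hie : (PySem.Dict.empty : PySem.Dict String (List String)).items = [] := rfl
    rw [hie, List.nil_append]
    apply List.map_congr_left
    intro g _
    rw [PySem.List.foldl_append_if (fun j => PySem.Str.isIn g j) (fun j => j) source []]
    simp
  -- B's side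
  set pairs := source.flatMap (fun w => (dgramsL w).map (fun g' => (g', w))) with hpairs
  have hBdict : source.foldl (fun index word => pvB_word word index) PySem.Dict.empty
      = pairs.foldl (fun d p => d.modify p.1 [] (fun l => l ++ [p.2])) PySem.Dict.empty := by
    have h1 : (fun (index : PySem.Dict String (List String)) (word : String) => pvB_word word index)
        = fun index word =>
            ((dgramsL word).map (fun g' => (g', word))).foldl
              (fun d p => d.modify p.1 [] (fun l => l ++ [p.2])) index := by
      funext index word
      rw [pvB_word_eq, List.foldl_map]
    rw [h1, hpairs, List.foldl_flatMap]
  have hkeys : (pairs.foldl (fun d p => d.modify p.1 [] (fun l => l ++ [p.2]))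
        PySem.Dict.empty).keys = uniq := by
    rw [PySem.Dict.keys_foldl_modify_key pairs Prod.fst []
      (fun _ p => fun l => l ++ [p.2]) PySem.Dict.empty]
    rw [PySem.Dict.keys_empty]
    have hmap : pairs.map Prod.fst = source.flatMap dgramsL := by
      simp [hpairs, List.map_flatMap, Function.comp_def]
    rw [hmap]
    have he : ([] : PySem.Set String) = PySem.Set.empty := rfl
    have h1 := update_flatMap_dgrams source PySem.Set.empty
    rw [PySem.Set.update_empty, PySem.Set.update_empty] at h1
    rw [he, PySem.Set.update_empty, h1, huniq]
  have hnodup : (pairs.foldl (fun d p => d.modify p.1 [] (fun l => l ++ [p.2]))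
        PySem.Dict.empty).keys.Nodup := by
    rw [hkeys, huniq]; exact PySem.Set.nodup_ofList _
  have hB : gen_bigrams_indexing_alt source
      = uniq.map (fun g => (g, source.filter (fun w => (dgramsL w).contains g))) := by
    unfold gen_bigrams_indexing_alt
    rw [hBdict, PySem.Dict.items_eq_map_keys _ hnodup [], hkeys]
    apply List.map_congr_left
    intro g _
    rw [PySem.Dict.getD_foldl_modify_append pairs PySem.Dict.empty g]
    rw [PySem.Dict.getD_empty, List.nil_append, hpairs, valB_eq]
  rw [hA, hB]
  apply List.map_congr_left
  intro g hg
  have hglen : g.toList.length = 2 := by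
    rw [huniq, PySem.Set.mem_ofList, List.mem_flatMap] at hg
    obtain ⟨w₀, _, hgw⟩ := hg
    exact grams_len hgw
  have : (fun w => PySem.Str.isIn g w) = fun w => (dgramsL w).contains g := by
    funext w; exact isIn_bridge g hglen w
  rw [this]
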